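-- pv_equiv track=rewrite | github.com/ericzastoupil/advent_of_code | 2025/Day5/part1/solution.py | separate_lists
-- ===== SOURCE A (Python) =====
-- def separate_lists(file_list):
--     range_list = []
--     ID_list = []
--     empty_found = False
--
--     for i in file_list:
--         if i == '':
--             empty_found = True
--             continue
--         if not empty_found:
--             range_list.append(i)
--         else:
--             ID_list.append(int(i))
--
--     return range_list, ID_list
-- ===== SOURCE B (Python) =====
-- def separate_lists(file_list):
--     idx = file_list.index('') if '' in file_list else len(file_list)
--     range_list = file_list[:idx]
--     ID_list = [int(x) for x in file_list[idx + 1:] if x != '']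
--     return range_list, ID_list
-- ===== Notes on version B (the rewrite author's own statement) =====
-- stated objective: simpler
-- what changed: Replaced the flag-driven accumulator loop with a find-then-two-slices decomposition: locate the first blank line, take the prefix as ranges and parse the non-blank strings of the suffix as IDs.
import Mathlib
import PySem

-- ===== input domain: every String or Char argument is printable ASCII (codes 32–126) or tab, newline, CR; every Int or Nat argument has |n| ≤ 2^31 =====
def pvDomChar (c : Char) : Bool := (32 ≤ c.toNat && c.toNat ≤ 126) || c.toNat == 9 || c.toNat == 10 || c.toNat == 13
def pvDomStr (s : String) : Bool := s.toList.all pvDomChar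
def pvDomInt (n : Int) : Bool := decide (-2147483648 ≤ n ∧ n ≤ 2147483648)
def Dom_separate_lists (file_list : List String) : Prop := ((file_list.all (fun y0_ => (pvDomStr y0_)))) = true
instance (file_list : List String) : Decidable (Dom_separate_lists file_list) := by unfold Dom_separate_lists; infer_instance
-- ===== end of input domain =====

-- B replaces A's flag-driven loop by a find-then-two-slices decomposition (simpler); same return value on Pre_.

-- ===== PORT A =====
-- Literal port of A's single loop over (range_list, ID_list, empty_found);
-- int(i) is PySem.Int.ofStr?, total via .getD 0 — Pre_ excludes the inputs where int() raises.
def separate_lists (file_list : List String) : List String × List Int :=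
  let st := file_list.foldl
    (fun (s : List String × List Int × Bool) i =>
      if i = "" then (s.1, s.2.1, true)
      else if s.2.2 = false then (s.1 ++ [i], s.2.1, s.2.2)
      else (s.1, s.2.1 ++ [(PySem.Int.ofStr? i).getD 0], s.2.2))
    ([], [], false)
  (st.1, st.2.1)

-- ===== PORT B =====
-- Port of Source B: idx = file_list.index('') if '' in file_list else len(file_list);
-- prefix slice is the ranges, the non-blank strings of file_list[idx+1:] parsed are the IDs.
def separate_lists_alt (file_list : List String) : List String × List Int :=
  let idx : Int :=
    if "" ∈ file_list then ((PySem.List.index? file_list "").getD 0 : Nat)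
    else (file_list.length : Nat)
  (PySem.List.slice file_list none (some idx),
   ((PySem.List.slice file_list (some (idx + 1)) none).filter (fun x => x ≠ "")).map
     (fun x => (PySem.Int.ofStr? x).getD 0))

-- ===== PRECONDITION & SPEC =====
-- Pre_ excludes exactly the inputs on which Python A raises ValueError: some non-blank
-- string after the first blank line does not parse as a Python int.
def Pre_separate_lists (file_list : List String) : Prop :=
  ∀ x ∈ (file_list.dropWhile (fun y => y ≠ "")).drop 1, x ≠ "" → (PySem.Int.ofStr? x).isSome
instance (file_list : List String) : Decidable (Pre_separate_lists file_list) := by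
  unfold Pre_separate_lists; infer_instance
def pvWitness_separate_lists : List String := ["1-3", "4-9", "", "5", "12"]

def Spec_separate_lists (file_list : List String) (out : List String × List Int) : Prop := out = separate_lists_alt file_list
instance (file_list : List String) (out : List String × List Int) : Decidable (Spec_separate_lists file_list out) := by unfold Spec_separate_lists; infer_instance

-- ===== CLAIM (what is proved, stated in full; the proofs are below) =====
def Claim_equal_separate_lists : Prop := ∀ (file_list : List String), Dom_separate_lists file_list → Pre_separate_lists file_list → Spec_separate_lists file_list (separate_lists file_list)

-- ===== LEMMAS AND PROOFS =====

def pvParse (x : String) : Int := (PySem.Int.ofStr? x).getD 0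

def pvStepA (s : List String × List Int × Bool) (i : String) : List String × List Int × Bool :=
  if i = "" then (s.1, s.2.1, true)
  else if s.2.2 = false then (s.1 ++ [i], s.2.1, s.2.2)
  else (s.1, s.2.1 ++ [(PySem.Int.ofStr? i).getD 0], s.2.2)

lemma loopA_true (l : List String) (r : List String) (d : List Int) :
    l.foldl pvStepA (r, d, true)
      = (r, d ++ (l.filter (fun x => x ≠ "")).map pvParse, true) := by
  induction l generalizing d with
  | nil => simp
  | cons x t ih =>
    by_cases hx : x = "" <;>
      simp [pvStepA, hx, ih, pvParse]

lemma loopA_false (l : List String) (r : List String) (d : List Int) :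
    l.foldl pvStepA (r, d, false)
      = if "" ∈ l then
          (r ++ l.takeWhile (fun y => y ≠ ""),
           d ++ (((l.dropWhile (fun y => y ≠ "")).drop 1).filter (fun x => x ≠ "")).map pvParse,
           true)
        else (r ++ l, d, false) := by
  induction l generalizing r with
  | nil => simp
  | cons x t ih =>
    by_cases hx : x = ""
    · subst hx
      simp [pvStepA, loopA_true]
    · have hmem : ("" ∈ x :: t) = ("" ∈ t) := by
        simp [eq_comm, hx]
      have hstep : pvStepA (r, d, false) x = (r ++ [x], d, false) := by
        simp [pvStepA, hx]
      rw [List.foldl_cons, hstep, ih (r ++ [x])]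
      by_cases ht : "" ∈ t <;>
        simp [ht, hx, hmem]

lemma takeWhile_of_split (pre suf : List String) (hpre : "" ∉ pre) :
    ((pre ++ "" :: suf).takeWhile (fun y => y ≠ "")) = pre := by
  induction pre with
  | nil => simp
  | cons a t ih =>
    have ha : a ≠ "" := by intro h; exact hpre (by simp [h])
    rw [List.cons_append, List.takeWhile_cons, if_pos (by simp [ha]),
      ih (by intro h; exact hpre (by simp [h]))]

lemma dropWhile_of_split (pre suf : List String) (hpre : "" ∉ pre) :
    ((pre ++ "" :: suf).dropWhile (fun y => y ≠ "")) = "" :: suf := by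
  induction pre with
  | nil => simp
  | cons a t ih =>
    have ha : a ≠ "" := by intro h; exact hpre (by simp [h])
    rw [List.cons_append, List.dropWhile_cons, if_pos (by simp [ha]),
      ih (by intro h; exact hpre (by simp [h]))]

-- ===== VERDICT (by name: the statement is the Claim_ definition above) =====
theorem separate_lists_spec : Claim_equal_separate_lists := by
  intro fl _hdom _hpre
  unfold Spec_separate_lists
  have hA : separate_lists fl
      = ((fl.foldl pvStepA ([], [], false)).1, (fl.foldl pvStepA ([], [], false)).2.1) := rfl
  rw [hA, loopA_false]
  unfold separate_lists_alt
  by_cases h : "" ∈ fl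
  · obtain ⟨k, hk⟩ := (PySem.List.index?_isSome_iff fl "").mpr h |> Option.isSome_iff_exists.mp
    obtain ⟨pre, suf, hfl, hlen, hpre⟩ := (PySem.List.index?_eq_some_iff fl "" k).mp hk
    have h1 : PySem.List.slice fl none (some ((k : Nat) : Int)) = fl.take k :=
      PySem.List.slice_to_natCast fl k
    have h2 : PySem.List.slice fl (some (((k : Nat) : Int) + 1)) none = fl.drop (k + 1) := by
      have := PySem.List.slice_from_natCast fl (k + 1)
      push_cast at this ⊢
      exact this
    simp only [if_pos h, hk, Option.getD_some, h1, h2]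
    subst hfl hlen
    rw [takeWhile_of_split pre suf hpre, dropWhile_of_split pre suf hpre]
    have hdrop : (pre ++ "" :: suf).drop (pre.length + 1) = suf := by
      simp [List.drop_append]
    have htake : (pre ++ "" :: suf).take pre.length = pre := by
      simp
    simp [hdrop, htake, pvParse]
  · have hnone : PySem.List.index? fl "" = none := (PySem.List.index?_eq_none_iff fl "").mpr h
    have h1 : PySem.List.slice fl none (some ((fl.length : Nat) : Int)) = fl := by
      rw [PySem.List.slice_to_natCast]; simp
    have h2 : PySem.List.slice fl (some (((fl.length : Nat) : Int) + 1)) none = [] := by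
      have := PySem.List.slice_from_natCast fl (fl.length + 1)
      push_cast at this ⊢
      rw [this]; simp
    simp [if_neg h, h1, h2]
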